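-- pv_equiv track=rewrite | github.com/Nanor/advent_of_code | 2024/src/days/day5.py | split_valid
-- ===== SOURCE A (Python) =====
-- def split_valid(prints: list[list[int]], orderings: list[list[int]]):
--     valid: list[list[int]] = []
--     invalid: list[list[int]] = []
--
--     for pages in prints:
--         v = True
--
--         for i, d in enumerate(pages):
--             for order in orderings:
--                 if d in order:
--                     after = order[1] == d
--                     other = order[0 if after else 1]
--
--                     if other in pages and after == (pages.index(other) > i):
--                         v = False
--                         break
--             else:
--                 continue
--             break
--
--         if v:
--             valid.append(pages)
--         else:
--             invalid.append(pages)
--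
--     return valid, invalid
-- ===== SOURCE B (Python) =====
-- def split_valid(prints: list[list[int]], orderings: list[list[int]]):
--     valid: list[list[int]] = []
--     invalid: list[list[int]] = []
--
--     for pages in prints:
--         first: dict[int, int] = {}
--         last: dict[int, int] = {}
--         for idx, p in enumerate(pages):
--             first.setdefault(p, idx)
--             last[p] = idx
--
--         bad = any(
--             len(order) >= 2 and order[1] in first
--             and any(d != order[1] and d in first and last[d] > first[order[1]]
--                     for d in order)
--             for order in orderings)
--
--         (invalid if bad else valid).append(pages)
--
--     return valid, invalid
-- ===== Notes on version B (the rewrite author's own statement) =====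
-- stated objective: faster
-- what changed: Instead of A's triple nested loop over page positions x rules with repeated pages.index scans, B builds first/last-occurrence dicts for each print in one pass and decides each rule by a single O(|rule|) check 'some d in rule other than rule[1] has last[d] > first[rule[1]]'.
-- outside the precondition, e.g. on split_valid([[1, 2]], [[2, 1], [1]]): A returns ([], [[1, 2]]), B returns ([], [[1, 2]])
import Mathlib
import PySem

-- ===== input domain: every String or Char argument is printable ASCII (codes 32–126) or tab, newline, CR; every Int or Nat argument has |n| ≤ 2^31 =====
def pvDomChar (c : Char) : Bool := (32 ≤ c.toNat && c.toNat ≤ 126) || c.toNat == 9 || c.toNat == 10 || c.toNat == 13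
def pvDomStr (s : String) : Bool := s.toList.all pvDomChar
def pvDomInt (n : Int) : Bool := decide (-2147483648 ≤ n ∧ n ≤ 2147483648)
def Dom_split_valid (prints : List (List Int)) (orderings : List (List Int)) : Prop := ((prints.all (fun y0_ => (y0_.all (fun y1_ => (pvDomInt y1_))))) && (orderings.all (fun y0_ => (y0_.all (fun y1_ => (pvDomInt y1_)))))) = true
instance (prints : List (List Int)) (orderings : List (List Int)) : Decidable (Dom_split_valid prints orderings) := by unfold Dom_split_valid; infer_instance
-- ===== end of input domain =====

-- B replaces A's position×rule nested loops (with repeated pages.index scans) by per-print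
-- first/last-occurrence dicts consulted once per rule; measured faster on the large inputs.

-- ===== PORT A =====
-- inner 'for order in orderings' loop of A; returns true iff it hit 'v = False; break'
def pvInnerA (pages : List Int) (i : Nat) (d : Int) : List (List Int) → Bool
  | [] => false
  | order :: rest =>
    if d ∈ order then
      let after : Bool := PySem.List.pyGetD order 1 0 == d
      let other : Int := PySem.List.pyGetD order (if after then 0 else 1) 0
      if other ∈ pages && (after == decide (((PySem.List.index? pages other).getD 0) > i)) then
        true
      else pvInnerA pages i d rest
    else pvInnerA pages i d rest

-- 'for i, d in enumerate(pages)' loop of A; returns the final v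
def pvPagesA (pages : List Int) (orderings : List (List Int)) : Nat → List Int → Bool
  | _, [] => true
  | i, d :: rest =>
    if pvInnerA pages i d orderings then false
    else pvPagesA pages orderings (i + 1) rest

def split_valid (prints : List (List Int)) (orderings : List (List Int)) : List (List Int) × List (List Int) :=
  prints.foldl
    (fun acc pages =>
      if pvPagesA pages orderings 0 pages then (acc.1 ++ [pages], acc.2)
      else (acc.1, acc.2 ++ [pages]))
    ([], [])

-- ===== PORT B =====
-- the 'for idx, p in enumerate(pages)' loop of B: first (setdefault) and last (overwrite) occurrence dicts
def pvMaps (pages : List Int) : PySem.Dict Int Int × PySem.Dict Int Int :=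
  (PySem.List.enumerate pages).foldl
    (fun fl p =>
      (PySem.Dict.setdefault fl.1 p.2 p.1, fl.2.insert p.2 p.1))
    (PySem.Dict.empty, PySem.Dict.empty)

-- the per-order condition of B's outer 'any'
def pvOrderBad (first last : PySem.Dict Int Int) (order : List Int) : Bool :=
  decide (order.length ≥ 2) && first.contains (PySem.List.pyGetD order 1 0) &&
    order.any (fun d =>
      (d != PySem.List.pyGetD order 1 0) && first.contains d &&
        decide (last.getD d 0 > first.getD (PySem.List.pyGetD order 1 0) 0))

def split_valid_alt (prints : List (List Int)) (orderings : List (List Int)) : List (List Int) × List (List Int) :=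
  prints.foldl
    (fun acc pages =>
      let fl := pvMaps pages
      if orderings.any (pvOrderBad fl.1 fl.2) then (acc.1, acc.2 ++ [pages])
      else (acc.1 ++ [pages], acc.2))
    ([], [])

-- ===== PRECONDITION & SPEC =====
-- Pre_ excludes inputs where a length-1 ordering's element occurs in some print: there A hits
-- order[1] and raises IndexError (unless a rule listed earlier already invalidated that print,
-- the cited case, where A still returns and B agrees by ignoring the short rule).
def Pre_split_valid (prints : List (List Int)) (orderings : List (List Int)) : Prop :=
  ∀ o ∈ orderings, o.length = 1 → ∀ pg ∈ prints, ∀ e ∈ o, e ∉ pg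
instance (prints : List (List Int)) (orderings : List (List Int)) : Decidable (Pre_split_valid prints orderings) := by unfold Pre_split_valid; infer_instance
def pvWitness_split_valid : List (List Int) × List (List Int) := ([[1, 2], [2, 1]], [[1, 2]])

def Spec_split_valid (prints : List (List Int)) (orderings : List (List Int)) (out : List (List Int) × List (List Int)) : Prop := out = split_valid_alt prints orderings
instance (prints : List (List Int)) (orderings : List (List Int)) (out : List (List Int) × List (List Int)) : Decidable (Spec_split_valid prints orderings out) := by unfold Spec_split_valid; infer_instance

-- ===== CLAIM (what is proved, stated in full; the proofs are below) =====
def Claim_equal_split_valid : Prop := ∀ (prints : List (List Int)) (orderings : List (List Int)), Dom_split_valid prints orderings → Pre_split_valid prints orderings → Spec_split_valid prints orderings (split_valid prints orderings)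

-- ===== LEMMAS AND PROOFS =====

-- abbreviations for the quantities both programs compute
def pvB (o : List Int) : Int := PySem.List.pyGetD o 1 0
def pvOther (o : List Int) (d : Int) : Int :=
  if pvB o == d then PySem.List.pyGetD o 0 0 else pvB o
def pvFirst (pages : List Int) (x : Int) : Nat := (PySem.List.index? pages x).getD 0
def pvLast : List Int → Int → Nat
  | [], _ => 0
  | _ :: rest, x => if x ∈ rest then pvLast rest x + 1 else 0

-- the condition on which A's inner loop fires for position i, value d = pages[i], rule o
def pvACond (pages : List Int) (i : Nat) (d : Int) (o : List Int) : Prop :=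
  d ∈ o ∧ pvOther o d ∈ pages ∧ ((pvB o = d) ↔ pvFirst pages (pvOther o d) > i)

-- the condition B's pvOrderBad decides for rule o
def pvBCond (pages : List Int) (o : List Int) : Prop :=
  2 ≤ o.length ∧ pvB o ∈ pages ∧
    ∃ d ∈ o, d ≠ pvB o ∧ d ∈ pages ∧ pvFirst pages (pvB o) < pvLast pages d

lemma beq_decide_iff (a : Bool) (P : Prop) [Decidable P] :
    ((a == decide P) = true) ↔ (a = true ↔ P) := by
  cases a <;> by_cases h : P <;> simp [h]

lemma inner_cons (pages : List Int) (i : Nat) (d : Int) (o : List Int) (rest : List (List Int)) :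
    pvInnerA pages i d (o :: rest) =
      if d ∈ o then
        (if (decide (pvOther o d ∈ pages) &&
              ((pvB o == d) == decide (pvFirst pages (pvOther o d) > i))) then true
         else pvInnerA pages i d rest)
      else pvInnerA pages i d rest := by
  simp only [pvInnerA, pvOther, pvB, pvFirst]
  by_cases h : (PySem.List.pyGetD o 1 0 == d) = true <;> simp [h]

lemma inner_iff (pages : List Int) (i : Nat) (d : Int) (L : List (List Int)) :
    pvInnerA pages i d L = true ↔ ∃ o ∈ L, pvACond pages i d o := by
  induction L with
  | nil => simp [pvInnerA]
  | cons o rest ih =>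
    rw [inner_cons]
    by_cases hmem : d ∈ o
    · rw [if_pos hmem]
      by_cases hC : (pvOther o d ∈ pages ∧ ((pvB o = d) ↔ pvFirst pages (pvOther o d) > i))
      · have hb : (decide (pvOther o d ∈ pages) &&
            ((pvB o == d) == decide (pvFirst pages (pvOther o d) > i))) = true := by
          rw [Bool.and_eq_true, decide_eq_true_eq, beq_decide_iff, beq_iff_eq]
          exact hC
        rw [hb, if_pos rfl]
        simp only [true_iff]
        exact ⟨o, by simp, hmem, hC.1, hC.2⟩
      · have hb : (decide (pvOther o d ∈ pages) &&
            ((pvB o == d) == decide (pvFirst pages (pvOther o d) > i))) = false := by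
          rw [← Bool.not_eq_true, Bool.and_eq_true, decide_eq_true_eq, beq_decide_iff, beq_iff_eq]
          exact hC
        rw [hb, if_neg (by simp), ih]
        constructor
        · rintro ⟨o', ho', hc⟩; exact ⟨o', by simp [ho'], hc⟩
        · rintro ⟨o', ho', hc⟩
          rcases List.mem_cons.mp ho' with rfl | ho'
          · exact absurd ⟨hc.2.1, hc.2.2⟩ hC
          · exact ⟨o', ho', hc⟩
    · rw [if_neg hmem, ih]
      constructor
      · rintro ⟨o', ho', hc⟩; exact ⟨o', by simp [ho'], hc⟩
      · rintro ⟨o', ho', hc⟩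
        rcases List.mem_cons.mp ho' with rfl | ho'
        · exact absurd hc.1 hmem
        · exact ⟨o', ho', hc⟩

lemma pagesA_false_iff (pages : List Int) (L : List (List Int)) :
    ∀ (tail : List Int) (i : Nat), pvPagesA pages L i tail = false ↔
      ∃ j, ∃ h : j < tail.length, pvInnerA pages (i + j) tail[j] L = true := by
  intro tail
  induction tail with
  | nil => simp [pvPagesA]
  | cons d rest ih =>
    intro i
    simp only [pvPagesA]
    by_cases h : pvInnerA pages i d L = true
    · rw [if_pos h]
      constructor
      · intro _; exact ⟨0, by simp, by simpa using h⟩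
      · intro _; rfl
    · rw [if_neg h, ih (i + 1)]
      constructor
      · rintro ⟨j, hj, hh⟩
        refine ⟨j + 1, by simpa using hj, ?_⟩
        have he : i + (j + 1) = i + 1 + j := by omega
        simpa [he] using hh
      · rintro ⟨j, hj, hh⟩
        match j with
        | 0 => exact absurd (by simpa using hh) h
        | j + 1 =>
          refine ⟨j, by simpa using hj, ?_⟩
          have he : i + 1 + j = i + (j + 1) := by omega
          simpa [he] using hh

-- ---- first/last occurrence facts ----
lemma first_spec (pages : List Int) (x : Int) (h : x ∈ pages) :
    ∃ hh : pvFirst pages x < pages.length, pages[pvFirst pages x] = x := by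
  obtain ⟨k, hk⟩ := Option.isSome_iff_exists.mp ((PySem.List.index?_isSome_iff pages x).mpr h)
  obtain ⟨hlt, hget, _⟩ := PySem.List.getElem_of_index?_eq_some hk
  have he : pvFirst pages x = k := by simp only [pvFirst]; rw [hk]; rfl
  rw [he]
  exact ⟨hlt, hget⟩

lemma first_le (pages : List Int) (x : Int) (i : Nat) (hi : i < pages.length)
    (hx : pages[i] = x) : pvFirst pages x ≤ i := by
  have hmem : x ∈ pages := hx ▸ pages.getElem_mem hi
  obtain ⟨k, hk⟩ := Option.isSome_iff_exists.mp ((PySem.List.index?_isSome_iff pages x).mpr hmem)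
  obtain ⟨hlt, hget, hmin⟩ := PySem.List.getElem_of_index?_eq_some hk
  have he : pvFirst pages x = k := by simp only [pvFirst]; rw [hk]; rfl
  rw [he]
  by_contra hgt
  exact hmin i (by omega) hx

lemma last_spec (pages : List Int) (x : Int) (h : x ∈ pages) :
    ∃ hh : pvLast pages x < pages.length, pages[pvLast pages x] = x := by
  induction pages with
  | nil => simp at h
  | cons p rest ih =>
    by_cases hr : x ∈ rest
    · obtain ⟨hh, hg⟩ := ih hr
      refine ⟨by simp [pvLast, hr]; omega, ?_⟩
      simpa [pvLast, hr] using hg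
    · have hx : x = p := by
        rcases List.mem_cons.mp h with h | h
        · exact h
        · exact absurd h hr
      subst hx
      exact ⟨by simp [pvLast, hr], by simp [pvLast, hr]⟩

lemma last_ge (pages : List Int) (x : Int) (i : Nat) (hi : i < pages.length)
    (hx : pages[i] = x) : i ≤ pvLast pages x := by
  induction pages generalizing i with
  | nil => simp at hi
  | cons p rest ih =>
    match i with
    | 0 => omega
    | i + 1 =>
      have hx' : rest[i]'(by simpa using hi) = x := by simpa using hx
      have hmem : x ∈ rest := hx' ▸ rest.getElem_mem (by simpa using hi)
      have := ih i (by simpa using hi) hx'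
      simp only [pvLast, hmem, if_pos]
      omega

lemma first_le_last (pages : List Int) (x : Int) (h : x ∈ pages) :
    pvFirst pages x ≤ pvLast pages x := by
  obtain ⟨hh, hg⟩ := last_spec pages x h
  exact first_le pages x _ hh hg

-- ---- the central per-rule equivalence ----
lemma order_iff (pages o : List Int) (H1 : o.length = 1 → ∀ e ∈ o, e ∉ pages) :
    (∃ i, ∃ h : i < pages.length, pvACond pages i pages[i] o) ↔ pvBCond pages o := by
  constructor
  · rintro ⟨i, hi, hdo, hop, hiff⟩
    have hdp : pages[i] ∈ pages := pages.getElem_mem hi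
    have hlen2 : 2 ≤ o.length := by
      have h1 : 1 ≤ o.length := List.length_pos_of_mem hdo
      rcases Nat.lt_or_ge o.length 2 with hl | hl
      · have : o.length = 1 := by omega
        exact absurd hdp (H1 this _ hdo)
      · exact hl
    by_cases hafter : pvB o = pages[i]
    · -- after = True: other = o[0]
      have hoth : pvOther o pages[i] = PySem.List.pyGetD o 0 0 := by
        simp [pvOther, hafter]
      rw [hoth] at hop hiff
      have hgt : pvFirst pages (PySem.List.pyGetD o 0 0) > i := hiff.mp hafter
      have ho0 : PySem.List.pyGetD o 0 0 ∈ o := by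
        rw [PySem.List.pyGetD_eq_getElem o 0 (by omega) (by exact_mod_cast by omega)]
        exact o.getElem_mem (by simpa using by omega)
      have hbp : pvB o ∈ pages := hafter ▸ hdp
      have h1 : pvFirst pages (pvB o) ≤ i := first_le pages _ i hi hafter.symm
      refine ⟨hlen2, hbp, PySem.List.pyGetD o 0 0, ho0, ?_, hop, ?_⟩
      · intro heq
        rw [heq] at hgt
        omega
      · have h2 : pvFirst pages (PySem.List.pyGetD o 0 0) ≤ pvLast pages (PySem.List.pyGetD o 0 0) :=
          first_le_last pages _ hop
        omega
    · -- after = False: other = o[1] = pvB o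
      have hoth : pvOther o pages[i] = pvB o := by
        simp [pvOther, hafter]
      rw [hoth] at hop hiff
      have hle : pvFirst pages (pvB o) ≤ i := by
        by_contra hgt
        exact hafter (hiff.mpr (by omega))
      have hne : pvFirst pages (pvB o) ≠ i := by
        intro he
        obtain ⟨hh, hg⟩ := first_spec pages (pvB o) hop
        subst he
        exact hafter hg.symm
      have hlast : i ≤ pvLast pages pages[i] := last_ge pages _ i hi rfl
      exact ⟨hlen2, hop, pages[i], hdo, fun h => hafter h.symm, hdp, by omega⟩
  · rintro ⟨hlen, hbp, d, hdo, hdb, hdp, hfl⟩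
    obtain ⟨hi, hg⟩ := last_spec pages d hdp
    refine ⟨pvLast pages d, hi, ?_⟩
    rw [hg]
    have hne : pvB o ≠ d := fun h => hdb h.symm
    have hoth : pvOther o d = pvB o := by simp [pvOther, hne]
    rw [pvACond, hoth]
    refine ⟨hdo, hbp, ?_⟩
    constructor
    · intro h; exact absurd h hne
    · intro h; omega

-- ---- dict characterisation for B's first/last maps ----
lemma setdefault_eq (d : PySem.Dict Int Int) (k v : Int) :
    d.setdefault k v = if d.contains k then d else d.insert k v := by
  by_cases h : d.contains k = true
  · simp [PySem.Dict.setdefault, h]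
  · rw [Bool.not_eq_true] at h
    rw [if_neg (by simp [h])]
    simp only [PySem.Dict.setdefault, h]
    simp only [Bool.false_eq_true, ite_false]
    apply PySem.Dict.ext
    rw [PySem.Dict.items_insert_of_not_contains _ _ h]

lemma maps_aux (x : Int) : ∀ (pages : List Int) (s : Int) (f0 l0 : PySem.Dict Int Int),
    (((PySem.List.enumerate pages s).foldl
        (fun fl p => (PySem.Dict.setdefault fl.1 p.2 p.1, fl.2.insert p.2 p.1))
        (f0, l0)).1.get? x =
      (match f0.get? x with
       | some v => some v
       | none => Option.map (fun k : Nat => s + (k : Int)) (PySem.List.index? pages x))) ∧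
    (((PySem.List.enumerate pages s).foldl
        (fun fl p => (PySem.Dict.setdefault fl.1 p.2 p.1, fl.2.insert p.2 p.1))
        (f0, l0)).2.get? x =
      if x ∈ pages then some (s + (pvLast pages x : Int)) else l0.get? x) := by
  intro pages
  induction pages with
  | nil =>
    intro s f0 l0
    have hnone : PySem.List.index? ([] : List Int) x = none :=
      (PySem.List.index?_eq_none_iff _ _).mpr (by simp)
    constructor
    · rw [PySem.List.enumerate_nil]
      cases h : f0.get? x <;> simp [h]
    · rw [PySem.List.enumerate_nil]
      simp
  | cons p rest ih =>
    intro s f0 l0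
    rw [PySem.List.enumerate_cons]
    simp only [List.foldl_cons]
    obtain ⟨ih1, ih2⟩ := ih (s + 1) (f0.setdefault p s) (l0.insert p s)
    constructor
    · rw [ih1]
      by_cases hx : x = p
      · subst hx
        rw [setdefault_eq]
        by_cases hc : f0.contains x = true
        · have hs := PySem.Dict.contains_eq_isSome_get? f0 x
          rw [hc] at hs
          obtain ⟨v, hv⟩ := Option.isSome_iff_exists.mp hs.symm
          rw [if_pos hc, hv]
        · rw [Bool.not_eq_true] at hc
          have hs := PySem.Dict.contains_eq_isSome_get? f0 x
          rw [hc] at hs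
          have hnone : f0.get? x = none := Option.not_isSome_iff_eq_none.mp (by rw [← hs]; simp)
          rw [if_neg (by simp [hc]), PySem.Dict.get?_insert_self, hnone,
            PySem.List.index?_cons_self]
          simp
      · have hget : (f0.setdefault p s).get? x = f0.get? x := by
          rw [setdefault_eq]
          by_cases hc : f0.contains p = true
          · rw [if_pos hc]
          · rw [if_neg hc, PySem.Dict.get?_insert_of_ne _ _ hx]
        rw [hget]
        cases h : f0.get? x with
        | some v => rfl
        | none =>
          simp only []
          rw [PySem.List.index?_cons_of_ne _ (fun h => hx h.symm), Option.map_map]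
          congr 1
          funext k
          simp only [Function.comp_apply]
          push_cast
          ring
    · rw [ih2]
      by_cases hr : x ∈ rest
      · rw [if_pos hr, if_pos (by simp [hr])]
        have hl : pvLast (p :: rest) x = pvLast rest x + 1 := by simp [pvLast, hr]
        rw [hl]
        congr 1
        push_cast
        ring
      · rw [if_neg hr]
        by_cases hx : x = p
        · subst hx
          have hl : pvLast (x :: rest) x = 0 := by simp [pvLast, hr]
          rw [if_pos (by simp), hl, PySem.Dict.get?_insert_self]
          simp
        · have hmem : x ∉ (p :: rest) := by simp [hx, hr]
          rw [if_neg hmem, PySem.Dict.get?_insert_of_ne _ _ hx]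

lemma first_get? (pages : List Int) (x : Int) :
    (pvMaps pages).1.get? x = Option.map (fun k : Nat => (k : Int)) (PySem.List.index? pages x) := by
  have h := (maps_aux x pages 0 PySem.Dict.empty PySem.Dict.empty).1
  unfold pvMaps
  rw [h]
  simp only [PySem.Dict.get?_empty]
  congr 1
  funext k
  simp

lemma last_get? (pages : List Int) (x : Int) :
    (pvMaps pages).2.get? x = if x ∈ pages then some ((pvLast pages x : Int)) else none := by
  have h := (maps_aux x pages 0 PySem.Dict.empty PySem.Dict.empty).2
  unfold pvMaps
  rw [h]
  by_cases hx : x ∈ pages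
  · rw [if_pos hx, if_pos hx]
    congr 2
    omega
  · rw [if_neg hx, if_neg hx, PySem.Dict.get?_empty]

lemma first_contains (pages : List Int) (x : Int) :
    (pvMaps pages).1.contains x = decide (x ∈ pages) := by
  rw [PySem.Dict.contains_eq_isSome_get?, first_get?]
  by_cases h : x ∈ pages
  · obtain ⟨k, hk⟩ := Option.isSome_iff_exists.mp ((PySem.List.index?_isSome_iff pages x).mpr h)
    rw [hk]
    simp [h]
  · have hn : PySem.List.index? pages x = none := (PySem.List.index?_eq_none_iff _ _).mpr h
    rw [hn]
    simp [h]

lemma first_getD (pages : List Int) (x : Int) (h : x ∈ pages) :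
    (pvMaps pages).1.getD x 0 = (pvFirst pages x : Int) := by
  obtain ⟨k, hk⟩ := Option.isSome_iff_exists.mp ((PySem.List.index?_isSome_iff pages x).mpr h)
  have he : pvFirst pages x = k := by simp only [pvFirst]; rw [hk]; rfl
  rw [PySem.Dict.getD_eq_get?_getD, first_get?, hk, he]
  rfl

lemma last_getD (pages : List Int) (x : Int) (h : x ∈ pages) :
    (pvMaps pages).2.getD x 0 = (pvLast pages x : Int) := by
  rw [PySem.Dict.getD_eq_get?_getD, last_get?, if_pos h]
  rfl

lemma orderBad_iff (pages o : List Int) :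
    pvOrderBad (pvMaps pages).1 (pvMaps pages).2 o = true ↔ pvBCond pages o := by
  simp only [pvOrderBad, pvBCond, pvB, Bool.and_eq_true, decide_eq_true_eq, List.any_eq_true,
    first_contains, bne_iff_ne, ge_iff_le]
  constructor
  · rintro ⟨⟨hlen, hbp⟩, d, hdo, ⟨hdb, hdp⟩, hlt⟩
    refine ⟨hlen, hbp, d, hdo, hdb, hdp, ?_⟩
    rw [first_getD pages _ hbp, last_getD pages _ hdp] at hlt
    exact_mod_cast hlt
  · rintro ⟨hlen, hbp, d, hdo, hdb, hdp, hlt⟩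
    refine ⟨⟨hlen, hbp⟩, d, hdo, ⟨hdb, hdp⟩, ?_⟩
    rw [first_getD pages _ hbp, last_getD pages _ hdp]
    exact_mod_cast hlt

-- ---- per-print equivalence and the final fold ----
lemma key_lemma (pages : List Int) (orderings : List (List Int))
    (Hp : ∀ o ∈ orderings, o.length = 1 → ∀ e ∈ o, e ∉ pages) :
    pvPagesA pages orderings 0 pages =
      !(orderings.any (pvOrderBad (pvMaps pages).1 (pvMaps pages).2)) := by
  have hiff : (pvPagesA pages orderings 0 pages = false) ↔
      (orderings.any (pvOrderBad (pvMaps pages).1 (pvMaps pages).2) = true) := by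
    rw [pagesA_false_iff]
    simp only [List.any_eq_true, inner_iff, Nat.zero_add, orderBad_iff]
    constructor
    · rintro ⟨j, hj, o, ho, hc⟩
      exact ⟨o, ho, (order_iff pages o (Hp o ho)).mp ⟨j, hj, hc⟩⟩
    · rintro ⟨o, ho, hc⟩
      obtain ⟨j, hj, hc'⟩ := (order_iff pages o (Hp o ho)).mpr hc
      exact ⟨j, hj, o, ho, hc'⟩
  cases hA : pvPagesA pages orderings 0 pages with
  | false => rw [hiff.mp hA]; rfl
  | true =>
    cases hB : orderings.any (pvOrderBad (pvMaps pages).1 (pvMaps pages).2) with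
    | false => rfl
    | true => rw [hiff.mpr hB] at hA; exact absurd hA (by simp)

lemma fold_aux (orderings : List (List Int)) :
    ∀ (prints : List (List Int)) (acc : List (List Int) × List (List Int)),
    (∀ pg ∈ prints, ∀ o ∈ orderings, o.length = 1 → ∀ e ∈ o, e ∉ pg) →
    prints.foldl
      (fun acc pages =>
        if pvPagesA pages orderings 0 pages then (acc.1 ++ [pages], acc.2)
        else (acc.1, acc.2 ++ [pages])) acc =
    prints.foldl
      (fun acc pages =>
        let fl := pvMaps pages
        if orderings.any (pvOrderBad fl.1 fl.2) then (acc.1, acc.2 ++ [pages])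
        else (acc.1 ++ [pages], acc.2)) acc := by
  intro prints
  induction prints with
  | nil => intro acc _; rfl
  | cons pages rest ih =>
    intro acc Hp
    simp only [List.foldl_cons]
    rw [key_lemma pages orderings (Hp pages (by simp))]
    cases hB : orderings.any (pvOrderBad (pvMaps pages).1 (pvMaps pages).2) with
    | false =>
      rw [if_pos (by simp : (!false) = true), if_neg (by simp : ¬((false : Bool) = true))]
      exact ih _ (fun pg hpg => Hp pg (by simp [hpg]))
    | true =>
      rw [if_neg (by simp : ¬((!true) = true)), if_pos (rfl : (true : Bool) = true)]
      exact ih _ (fun pg hpg => Hp pg (by simp [hpg]))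

-- ===== VERDICT (by name: the statement is the Claim_ definition above) =====
theorem split_valid_spec : Claim_equal_split_valid := by
  intro prints orderings _ hpre
  unfold Spec_split_valid split_valid split_valid_alt
  exact fold_aux orderings prints ([], [])
    (fun pg hpg o ho h1 e he => hpre o ho h1 pg hpg e he)
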